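-- pv_equiv track=rewrite | github.com/suimenqx/lua-nil-guard | src/lua_nil_guard/adjudication.py | _find_repeat_start_index
-- ===== SOURCE A (Python) =====
-- def _is_repeat_open(stripped_line: str) -> bool:
--     return stripped_line == "repeat" or stripped_line.startswith("repeat ")
--
-- def _is_repeat_until_line(stripped_line: str) -> bool:
--     return stripped_line.startswith("until ")
--
-- def _find_repeat_start_index(lines: list[str], target_index: int) -> int | None:
--     depth = 1
--     for index in range(target_index - 1, -1, -1):
--         stripped = lines[index].strip()
--         if _is_repeat_until_line(stripped):
--             depth += 1
--             continue
--         if _is_repeat_open(stripped):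
--             depth -= 1
--             if depth == 0:
--                 return index
--     return None
-- ===== SOURCE B (Python) =====
-- def _find_repeat_start_index(lines: list[str], target_index: int) -> int | None:
--     # Forward scan keeping a stack of open `repeat` line indices.
--     stack = []
--     for index in range(target_index):
--         stripped = lines[index].strip()
--         if stripped.startswith("until "):
--             if stack:
--                 stack.pop()
--         elif stripped == "repeat" or stripped.startswith("repeat "):
--             stack.append(index)
--     return stack[-1] if stack else None
-- ===== Notes on version B (the rewrite author's own statement) =====
-- stated objective: alternative
-- what changed: Replaces the backward depth-counter scan from target_index-1 with a forward traversal of lines[0:target_index] that maintains an explicit stack of open-repeat indices and returns the stack top.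
import Mathlib
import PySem

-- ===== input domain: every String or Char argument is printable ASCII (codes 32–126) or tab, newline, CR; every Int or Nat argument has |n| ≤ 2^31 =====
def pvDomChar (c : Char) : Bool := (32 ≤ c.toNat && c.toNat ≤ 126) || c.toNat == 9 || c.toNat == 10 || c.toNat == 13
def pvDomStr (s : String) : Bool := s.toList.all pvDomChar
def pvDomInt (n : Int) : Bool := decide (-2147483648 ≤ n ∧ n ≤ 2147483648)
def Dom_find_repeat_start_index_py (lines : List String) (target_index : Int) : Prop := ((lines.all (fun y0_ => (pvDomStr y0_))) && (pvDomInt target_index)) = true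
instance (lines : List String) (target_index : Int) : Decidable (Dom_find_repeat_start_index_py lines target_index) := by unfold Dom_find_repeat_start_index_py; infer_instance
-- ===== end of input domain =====

-- B replaces A's backward depth-counter scan with a forward stack-of-open-repeat-indices
-- traversal (objective: alternative, same O(n) cost).


-- ===== PORT A =====
def pvIsRepeatOpen (s : String) : Bool := (s == "repeat") || PySem.Str.startswith s "repeat "

def pvIsRepeatUntil (s : String) : Bool := PySem.Str.startswith s "until "

-- the backward for-loop of A over the index list range(target_index-1, -1, -1)
def pvFindLoopA (lines : List String) (depth : Int) : List Int → Option Int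
  | [] => none
  | i :: rest =>
    match PySem.List.pyGet? lines i with
    | none => none   -- IndexError (excluded by Pre_)
    | some line =>
      let stripped := PySem.Str.strip line
      if pvIsRepeatUntil stripped then pvFindLoopA lines (depth + 1) rest
      else if pvIsRepeatOpen stripped then
        if depth - 1 = 0 then some i else pvFindLoopA lines (depth - 1) rest
      else pvFindLoopA lines depth rest

def find_repeat_start_index_py (lines : List String) (target_index : Int) : Option Int :=
  pvFindLoopA lines 1 (PySem.List.pyRange (target_index - 1) (-1) (-1))

-- ===== PORT B =====
-- one step of B's forward loop body (pyGetD is exact under Pre_: 0 ≤ i < len)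
def pvStackStep (lines : List String) (st : List Int) (i : Int) : List Int :=
  let stripped := PySem.Str.strip (PySem.List.pyGetD lines i "")
  if pvIsRepeatUntil stripped then (if st = [] then st else st.dropLast)
  else if pvIsRepeatOpen stripped then st ++ [i]
  else st

def find_repeat_start_index_py_alt (lines : List String) (target_index : Int) : Option Int :=
  ((PySem.List.pyRange 0 target_index 1).foldl (pvStackStep lines) []).getLast?

-- ===== PRECONDITION & SPEC =====
-- Pre_ excludes exactly target_index > len(lines), where both Pythons raise IndexError.
def Pre_find_repeat_start_index_py (lines : List String) (target_index : Int) : Prop :=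
  target_index ≤ (lines.length : Int)
instance (lines : List String) (target_index : Int) : Decidable (Pre_find_repeat_start_index_py lines target_index) := by unfold Pre_find_repeat_start_index_py; infer_instance

def pvWitness_find_repeat_start_index_py : List String × Int := (["repeat", "until x"], 2)

def Spec_find_repeat_start_index_py (lines : List String) (target_index : Int) (out : Option Int) : Prop := out = find_repeat_start_index_py_alt lines target_index
instance (lines : List String) (target_index : Int) (out : Option Int) : Decidable (Spec_find_repeat_start_index_py lines target_index out) := by unfold Spec_find_repeat_start_index_py; infer_instance

-- ===== CLAIM (what is proved, stated in full; the proofs are below) =====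
def Claim_equal_find_repeat_start_index_py : Prop := ∀ (lines : List String) (target_index : Int), Dom_find_repeat_start_index_py lines target_index → Pre_find_repeat_start_index_py lines target_index → Spec_find_repeat_start_index_py lines target_index (find_repeat_start_index_py lines target_index)

-- ===== LEMMAS AND PROOFS =====

lemma pvReverseDropLast {α : Type} (l : List α) (h : l ≠ []) :
    l.dropLast.reverse = l.reverse.tail := by
  induction l using List.reverseRecOn with
  | nil => simp at h
  | append_singleton xs x _ => simp

-- B's stack after the first k iterations
def pvStk (lines : List String) (k : Nat) : List Int :=
  (PySem.List.pyRange 0 (k : Int) 1).foldl (pvStackStep lines) []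

lemma pvStk_succ (lines : List String) (k : Nat) :
    pvStk lines (k + 1) = pvStackStep lines (pvStk lines k) (k : Int) := by
  unfold pvStk
  rw [show ((k + 1 : Nat) : Int) = (k : Int) + 1 by push_cast; ring,
      PySem.List.pyRange_one_succ_right (by omega), List.foldl_append]
  simp

-- Main invariant: the backward scan at depth d+1 returns the d-th element from the
-- top of B's stack (counting from 0).
lemma pvMain (lines : List String) (k d : Nat) (hk : k ≤ lines.length) :
    pvFindLoopA lines ((d : Int) + 1) (PySem.List.pyRange ((k : Int) - 1) (-1) (-1)) =
      (pvStk lines k).reverse[d]? := by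
  induction k generalizing d with
  | zero =>
      rw [PySem.List.pyRange_neg_one_eq_nil (by norm_num)]
      simp [pvFindLoopA, pvStk, PySem.List.pyRange_one_eq_nil]
  | succ k ih =>
      have hk' : k ≤ lines.length := by omega
      have hkl : k < lines.length := by omega
      have hget : PySem.List.pyGet? lines (k : Int) = some lines[k] := by
        simp [PySem.List.pyGet?_natCast, List.getElem?_eq_getElem hkl]
      have hgetD : PySem.List.pyGetD lines (k : Int) "" = lines[k] := by
        simp [PySem.List.pyGetD_natCast, List.getD_eq_getElem?_getD,
          List.getElem?_eq_getElem hkl]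
      rw [show ((k + 1 : Nat) : Int) - 1 = (k : Int) by push_cast; ring,
          PySem.List.pyRange_neg_one_cons (show (-1 : Int) < (k : Int) by omega),
          pvStk_succ]
      unfold pvFindLoopA pvStackStep
      rw [hget, hgetD]
      by_cases hu : pvIsRepeatUntil (PySem.Str.strip lines[k]) = true
      · -- until line: depth grows on the A side, the stack pops (or stays empty) on B's
        simp only [hu, if_true]
        have ih' := ih (d + 1) hk'
        push_cast at ih'
        rw [ih']
        by_cases hst : pvStk lines k = []
        · simp [hst]
        · rw [if_neg hst, pvReverseDropLast _ hst, List.getElem?_tail]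
      · have hu' : pvIsRepeatUntil (PySem.Str.strip lines[k]) = false := by
          simpa using hu
        by_cases ho : pvIsRepeatOpen (PySem.Str.strip lines[k]) = true
        · -- repeat line: A decrements depth or answers, B pushes the index
          simp only [hu', ho, Bool.false_eq_true, if_false, if_true]
          cases d with
          | zero => simp
          | succ d' =>
              rw [if_neg (show ¬ (((d' + 1 : Nat) : Int) + 1 - 1 = 0) by push_cast; omega),
                  show ((d' + 1 : Nat) : Int) + 1 - 1 = ((d' : Nat) : Int) + 1 by
                    push_cast; ring,
                  ih d' hk']
              simp
        · have ho' : pvIsRepeatOpen (PySem.Str.strip lines[k]) = false := by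
            simpa using ho
          simp only [hu', ho', Bool.false_eq_true, if_false]
          exact ih d hk'

-- ===== VERDICT (by name: the statement is the Claim_ definition above) =====
theorem find_repeat_start_index_py_spec : Claim_equal_find_repeat_start_index_py := by
  intro lines target_index _hdom hpre
  unfold Spec_find_repeat_start_index_py find_repeat_start_index_py
    find_repeat_start_index_py_alt
  by_cases ht : target_index ≤ 0
  · rw [PySem.List.pyRange_neg_one_eq_nil (by omega),
        PySem.List.pyRange_one_eq_nil (by omega)]
    simp [pvFindLoopA]
  · have hkt : target_index = ((target_index.toNat : Nat) : Int) := by omega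
    have hk : target_index.toNat ≤ lines.length := by
      unfold Pre_find_repeat_start_index_py at hpre; omega
    rw [hkt]
    have hmain := pvMain lines target_index.toNat 0 hk
    simp only [Nat.cast_zero, zero_add] at hmain
    rw [hmain,
        show ((PySem.List.pyRange 0 ((target_index.toNat : Nat) : Int) 1).foldl
          (pvStackStep lines) []) = pvStk lines target_index.toNat from rfl,
        ← List.head?_eq_getElem?, List.head?_reverse]
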